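-- pv_equiv track=rewrite | github.com/hunminkim98/ml-comotion | src/comotion_demo/utils/track.py | combine_refs
-- ===== SOURCE A (Python) =====
-- def combine_refs(all_refs, rngs):
--     combined = {}
--     for track_ref, rng in zip(all_refs, rngs):
--         offset = rng[0]
--         for track_id, (i0, i1) in track_ref.items():
--             i0, i1 = i0 + offset, i1 + offset
--             if track_id not in combined:
--                 combined[track_id] = [i0, i1]
--             else:
--                 i0_, i1_ = combined[track_id]
--                 combined[track_id] = [min(i0, i0_), max(i1, i1_)]
--     return combined
-- ===== SOURCE B (Python) =====
-- def combine_refs(all_refs, rngs):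
--     # Two-pass decomposition: first group every offset-shifted interval per track id,
--     # then reduce each group to [min of starts, max of ends].
--     groups = {}
--     for track_ref, rng in zip(all_refs, rngs):
--         offset = rng[0]
--         for track_id, (i0, i1) in track_ref.items():
--             groups[track_id] = groups.get(track_id, []) + [(i0 + offset, i1 + offset)]
--     return {tid: [min(i0 for i0, _ in ps), max(i1 for _, i1 in ps)]
--             for tid, ps in groups.items()}
-- ===== Notes on version B (the rewrite author's own statement) =====
-- stated objective: alternative
-- what changed: B separates the work into two differently-shaped passes: it first builds an index of every offset-shifted interval per track id (keeping all intervals, in first-encounter key order), then a dict comprehension reduces each group to [min start, max end], instead of A's single fold that maintains a running min/max with a membership test per item.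
import Mathlib
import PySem

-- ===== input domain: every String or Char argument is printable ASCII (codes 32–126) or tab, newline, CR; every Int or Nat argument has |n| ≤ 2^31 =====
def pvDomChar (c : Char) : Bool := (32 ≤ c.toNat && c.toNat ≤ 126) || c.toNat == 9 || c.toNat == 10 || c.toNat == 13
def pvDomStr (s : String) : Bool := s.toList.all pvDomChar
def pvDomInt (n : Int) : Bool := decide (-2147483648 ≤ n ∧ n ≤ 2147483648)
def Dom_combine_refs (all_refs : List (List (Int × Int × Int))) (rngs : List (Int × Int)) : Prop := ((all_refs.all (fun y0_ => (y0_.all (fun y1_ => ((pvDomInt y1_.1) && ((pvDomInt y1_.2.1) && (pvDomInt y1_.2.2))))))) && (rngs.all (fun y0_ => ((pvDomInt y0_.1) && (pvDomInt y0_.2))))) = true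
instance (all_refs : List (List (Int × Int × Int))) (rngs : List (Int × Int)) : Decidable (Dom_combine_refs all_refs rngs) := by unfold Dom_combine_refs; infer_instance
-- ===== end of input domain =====

-- B replaces A's incremental min/max fold by a two-pass grouping (index of all shifted
-- intervals per id, then a reduction pass); alternative decomposition, same asymptotic cost.


-- ===== PORT A =====
-- one item of A's inner loop body: membership test, then new entry or running min/max merge
def pvStepA (off : Int) (c : PySem.Dict Int (List Int)) (it : Int × Int × Int) :
    PySem.Dict Int (List Int) :=
  let i0 := it.2.1 + off
  let i1 := it.2.2 + off
  if c.contains it.1 = false then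
    c.insert it.1 [i0, i1]
  else
    match c.getD it.1 [] with
    | [a, b] => c.insert it.1 [min i0 a, max i1 b]
    | _ => c    -- unreachable (every stored value is a 2-list; Python would raise on unpacking)

def combine_refs (all_refs : List (List (Int × Int × Int))) (rngs : List (Int × Int)) : List (Int × List Int) :=
  ((List.zip all_refs rngs).foldl
    (fun c p => (PySem.Dict.ofList p.1).items.foldl (pvStepA p.2.1) c)
    PySem.Dict.empty).items

-- ===== PORT B =====
-- first pass: append the shifted interval to the group of its track id
def pvStepB (off : Int) (g : PySem.Dict Int (List (Int × Int))) (it : Int × Int × Int) :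
    PySem.Dict Int (List (Int × Int)) :=
  g.insert it.1 (g.getD it.1 [] ++ [(it.2.1 + off, it.2.2 + off)])

-- second pass: reduce one group to [min of starts, max of ends]
def pvRed (v : List (Int × Int)) : List Int :=
  [(PySem.List.min? (v.map Prod.fst) id).getD 0, (PySem.List.max? (v.map Prod.snd) id).getD 0]

def combine_refs_alt (all_refs : List (List (Int × Int × Int))) (rngs : List (Int × Int)) : List (Int × List Int) :=
  (((List.zip all_refs rngs).foldl
      (fun g p => (PySem.Dict.ofList p.1).items.foldl (pvStepB p.2.1) g)
      PySem.Dict.empty).items).map (fun kv => (kv.1, pvRed kv.2))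

-- ===== PRECONDITION & SPEC =====
def Spec_combine_refs (all_refs : List (List (Int × Int × Int))) (rngs : List (Int × Int)) (out : List (Int × List Int)) : Prop := out = combine_refs_alt all_refs rngs
instance (all_refs : List (List (Int × Int × Int))) (rngs : List (Int × Int)) (out : List (Int × List Int)) : Decidable (Spec_combine_refs all_refs rngs out) := by unfold Spec_combine_refs; infer_instance

-- ===== CLAIM (what is proved, stated in full; the proofs are below) =====
def Claim_equal_combine_refs : Prop := ∀ (all_refs : List (List (Int × Int × Int))) (rngs : List (Int × Int)), Dom_combine_refs all_refs rngs → Spec_combine_refs all_refs rngs (combine_refs all_refs rngs)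

-- ===== LEMMAS AND PROOFS =====

-- the invariant tying A's running dict to B's group index
def pvRel (c : PySem.Dict Int (List Int)) (g : PySem.Dict Int (List (Int × Int))) : Prop :=
  c.items = g.items.map (fun kv => (kv.1, pvRed kv.2)) ∧ ∀ kv ∈ g.items, kv.2 ≠ []

theorem pv_contains_map (l : List (Int × List (Int × Int))) (k : Int) :
    (PySem.Dict.mk (l.map (fun kv => (kv.1, pvRed kv.2)))).contains k
      = (PySem.Dict.mk l).contains k := by
  simp [PySem.Dict.contains, List.any_map, Function.comp_def]

theorem pv_get?_map (l : List (Int × List (Int × Int))) (k : Int) :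
    (PySem.Dict.mk (l.map (fun kv => (kv.1, pvRed kv.2)))).get? k
      = ((PySem.Dict.mk l).get? k).map pvRed := by
  induction l with
  | nil => simp [PySem.Dict.get?]
  | cons hd tl ih =>
    obtain ⟨k1, v1⟩ := hd
    simp only [List.map_cons, PySem.Dict.get?_mk_cons]
    by_cases h : (k1 == k) = true
    · simp [h]
    · simp [h, ih]

theorem pv_min?_cons_isSome : ∀ (t : List Int) (x : Int), (PySem.List.min? (x :: t) id).isSome := by
  intro t
  induction t with
  | nil => intro x; simp [PySem.List.min?]
  | cons hd tl ih =>
    intro x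
    by_cases h : hd < x
    · have heq : PySem.List.min? (x :: hd :: tl) id = PySem.List.min? (hd :: tl) id := by
        simp [PySem.List.min?, h]
      rw [heq]; exact ih hd
    · have heq : PySem.List.min? (x :: hd :: tl) id = PySem.List.min? (x :: tl) id := by
        simp [PySem.List.min?, h]
      rw [heq]; exact ih x

theorem pv_max?_cons_isSome : ∀ (t : List Int) (x : Int), (PySem.List.max? (x :: t) id).isSome := by
  intro t
  induction t with
  | nil => intro x; simp [PySem.List.max?]
  | cons hd tl ih =>
    intro x
    by_cases h : x < hd
    · have heq : PySem.List.max? (x :: hd :: tl) id = PySem.List.max? (hd :: tl) id := by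
        simp [PySem.List.max?, h]
      rw [heq]; exact ih hd
    · have heq : PySem.List.max? (x :: hd :: tl) id = PySem.List.max? (x :: tl) id := by
        simp [PySem.List.max?, h]
      rw [heq]; exact ih x

theorem pv_min?_some (l : List Int) (hl : l ≠ []) :
    ∃ m, PySem.List.min? l id = some m := by
  cases l with
  | nil => exact absurd rfl hl
  | cons x t => exact Option.isSome_iff_exists.mp (pv_min?_cons_isSome t x)

theorem pv_max?_some (l : List Int) (hl : l ≠ []) :
    ∃ m, PySem.List.max? l id = some m := by
  cases l with
  | nil => exact absurd rfl hl
  | cons x t => exact Option.isSome_iff_exists.mp (pv_max?_cons_isSome t x)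

theorem pv_min?_append (l : List Int) (a m : Int) (h : PySem.List.min? l id = some m) :
    PySem.List.min? (l ++ [a]) id = some (min a m) := by
  simp only [PySem.List.min?] at h ⊢
  rw [List.foldl_append, h]
  simp only [List.foldl_cons, List.foldl_nil]
  split_ifs with hlt <;> simp [id] at hlt ⊢ <;> omega

theorem pv_max?_append (l : List Int) (a m : Int) (h : PySem.List.max? l id = some m) :
    PySem.List.max? (l ++ [a]) id = some (max a m) := by
  simp only [PySem.List.max?] at h ⊢
  rw [List.foldl_append, h]
  simp only [List.foldl_cons, List.foldl_nil]
  split_ifs with hlt <;> simp [id] at hlt ⊢ <;> omega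

theorem pvRed_single (x : Int × Int) : pvRed [x] = [x.1, x.2] := by
  simp [pvRed, PySem.List.min?, PySem.List.max?]

theorem pv_step_pres (off : Int) (it : Int × Int × Int)
    (c : PySem.Dict Int (List Int)) (g : PySem.Dict Int (List (Int × Int)))
    (h : pvRel c g) : pvRel (pvStepA off c it) (pvStepB off g it) := by
  obtain ⟨hitems, hne⟩ := h
  have hc : c = PySem.Dict.mk (g.items.map (fun kv => (kv.1, pvRed kv.2))) := by
    cases c; simpa [PySem.Dict.items] using hitems
  have hcont : c.contains it.1 = g.contains it.1 := by
    rw [hc]; cases g; exact pv_contains_map _ _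
  have hget : c.get? it.1 = (g.get? it.1).map pvRed := by
    rw [hc]; cases g; exact pv_get?_map _ _
  by_cases hin : g.contains it.1 = true
  · -- existing key: A merges min/max, B appends to the group
    obtain ⟨v0, hv0⟩ : ∃ v0, g.get? it.1 = some v0 := by
      have hs := PySem.Dict.contains_eq_isSome_get? g it.1
      rw [hin] at hs
      exact Option.isSome_iff_exists.mp hs.symm
    have hv0ne : v0 ≠ [] := hne _ (PySem.Dict.mem_items_of_get?_eq_some g hv0)
    have hgD : g.getD it.1 [] = v0 := by simp [PySem.Dict.getD, hv0]
    have hcD : c.getD it.1 [] = pvRed v0 := by simp [PySem.Dict.getD, hget, hv0]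
    have hcc : c.contains it.1 = true := by rw [hcont]; exact hin
    constructor
    · show (pvStepA off c it).items
        = ((pvStepB off g it).items).map (fun kv => (kv.1, pvRed kv.2))
      simp only [pvStepA, pvStepB]
      rw [if_neg (by simp [hcc]), hcD, hgD]
      simp only [pvRed]
      rw [PySem.Dict.items_insert, PySem.Dict.items_insert, if_pos hcc, if_pos hin]
      rw [hitems]
      simp only [List.map_map]
      refine List.map_congr_left (fun p _ => ?_)
      simp only [Function.comp_def]
      by_cases hp : (p.1 == it.1) = true
      · obtain ⟨m, hm⟩ := pv_min?_some (v0.map Prod.fst) (by simpa using hv0ne)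
        obtain ⟨M, hM⟩ := pv_max?_some (v0.map Prod.snd) (by simpa using hv0ne)
        simp [hp, List.map_append, pv_min?_append _ _ _ hm, pv_max?_append _ _ _ hM, hm, hM]
      · simp [hp, pvRed]
    · intro kv hkv
      simp only [pvStepB] at hkv
      rcases (PySem.Dict.mem_items_insert _ _ _ _).mp hkv with h1 | h1
      · subst h1; simp
      · exact hne _ h1.1
  · -- new key: both append a fresh entry
    have hin' : g.contains it.1 = false := by
      cases hgc : g.contains it.1
      · rfl
      · exact absurd hgc hin
    have hcc : c.contains it.1 = false := by rw [hcont]; exact hin'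
    have hgD : g.getD it.1 [] = [] := PySem.Dict.getD_of_not_contains g [] hin'
    constructor
    · show (pvStepA off c it).items
        = ((pvStepB off g it).items).map (fun kv => (kv.1, pvRed kv.2))
      simp only [pvStepA, pvStepB]
      rw [if_pos hcc, hgD]
      simp only [List.nil_append]
      rw [PySem.Dict.items_insert, PySem.Dict.items_insert, if_neg (by simp [hcc]),
        if_neg (by simp [hin'])]
      rw [hitems, List.map_append]
      simp [pvRed_single]
    · intro kv hkv
      simp only [pvStepB] at hkv
      rcases (PySem.Dict.mem_items_insert _ _ _ _).mp hkv with h1 | h1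
      · subst h1; simp
      · exact hne _ h1.1

theorem pv_inner_pres (l : List (Int × Int × Int)) (off : Int) :
    ∀ (c : PySem.Dict Int (List Int)) (g : PySem.Dict Int (List (Int × Int))),
    pvRel c g → pvRel (l.foldl (pvStepA off) c) (l.foldl (pvStepB off) g) := by
  induction l with
  | nil => intro c g h; simpa using h
  | cons hd tl ih =>
    intro c g h
    simpa using ih _ _ (pv_step_pres off hd c g h)

theorem pv_outer_pres (L : List (List (Int × Int × Int) × (Int × Int))) :
    ∀ (c : PySem.Dict Int (List Int)) (g : PySem.Dict Int (List (Int × Int))),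
    pvRel c g →
    pvRel (L.foldl (fun c p => (PySem.Dict.ofList p.1).items.foldl (pvStepA p.2.1) c) c)
          (L.foldl (fun g p => (PySem.Dict.ofList p.1).items.foldl (pvStepB p.2.1) g) g) := by
  induction L with
  | nil => intro c g h; simpa using h
  | cons hd tl ih =>
    intro c g h
    simpa using ih _ _ (pv_inner_pres (PySem.Dict.ofList hd.1).items hd.2.1 c g h)

theorem pvRel_empty : pvRel PySem.Dict.empty PySem.Dict.empty := by
  constructor
  · simp [PySem.Dict.empty]
  · intro kv hkv; simp [PySem.Dict.empty] at hkv

-- ===== VERDICT (by name: the statement is the Claim_ definition above) =====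
theorem combine_refs_spec : Claim_equal_combine_refs := by
  intro all_refs rngs _
  show combine_refs all_refs rngs = combine_refs_alt all_refs rngs
  have h := pv_outer_pres (List.zip all_refs rngs) _ _ pvRel_empty
  exact h.1
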